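-- pv_equiv track=rewrite | github.com/hallgrimur1471/programming | google_code_jam/2018/practice/round1a/downloaded/platypus179-0000000000030590.py | solve
-- ===== SOURCE A (Python) =====
-- def solve(n, m, h, v, f):
--     sums = [[0 for i in range(m + 1)] for j in range(n + 1)]
--     for i in range(n):
--         for j in range(m):
--             sums[i + 1][j + 1] = sums[i + 1][j] + sums[i][j + 1] - sums[i][j] + int(f[i][j] == '@')
--     if sums[n][m] % ((h + 1) * (v + 1)) != 0:
--         return False
--     each = sums[n][m] // ((h + 1) * (v + 1))
--     if each == 0:
--         return True
--     li = -1
--     vlines = [-1]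
--     for i in range(m):
--         if sums[n][i + 1] - sums[n][li + 1] == each * (h + 1):
--             li = i
--             vlines.append(i)
--     lj = -1
--     cnth = 0
--     hlines = [-1]
--     for i in range(n):
--         if sums[i + 1][m] - sums[lj + 1][m] == each * (v + 1):
--             lj = i
--             hlines.append(i)
--     if len(vlines) < v + 2 or len(hlines) < h + 2:
--         return False
--     for i in range(1, v + 2):
--         for j in range(1, h + 2):
--             if sums[hlines[j] + 1][vlines[i] + 1] - sums[hlines[j - 1] + 1][vlines[i] + 1] - sums[hlines[j] + 1][vlines[i - 1] + 1] + sums[hlines[j - 1] + 1][vlines[i - 1] + 1] != each: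
--                 return False
--     return True
-- ===== SOURCE B (Python) =====
-- def solve(n, m, h, v, f):
--     # rowpre[i] = number of '@' in rows [0, i); colpre[j] = number of '@' in columns [0, j)
--     rowpre = [0] * (n + 1)
--     for i in range(n):
--         cnt = 0
--         for j in range(m):
--             if f[i][j] == '@':
--                 cnt += 1
--         rowpre[i + 1] = rowpre[i] + cnt
--     colpre = [0] * (m + 1)
--     for j in range(m):
--         cnt = 0
--         for i in range(n):
--             if f[i][j] == '@':
--                 cnt += 1
--         colpre[j + 1] = colpre[j] + cnt
--     rowtotal = rowpre[n]
--     coltotal = colpre[m]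
--     parts = (h + 1) * (v + 1)
--     if rowtotal % parts != 0:
--         return False
--     each = rowtotal // parts
--     if each == 0:
--         return True
--     vtarget = coltotal // (v + 1)   # chips per vertical slice = each * (h + 1)
--     htarget = rowtotal // (h + 1)   # chips per horizontal slice = each * (v + 1)
--     vlines = [-1]
--     last = 0
--     for j in range(m):
--         if colpre[j + 1] - colpre[last] == vtarget:
--             vlines.append(j)
--             last = j + 1
--     hlines = [-1]
--     last = 0
--     for i in range(n):
--         if rowpre[i + 1] - rowpre[last] == htarget:
--             hlines.append(i)
--             last = i + 1
--     if len(vlines) < v + 2 or len(hlines) < h + 2: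
--         return False
--     for bi in range(1, v + 2):
--         for bj in range(1, h + 2):
--             cnt = 0
--             for r in range(hlines[bj - 1] + 1, hlines[bj] + 1):
--                 for c in range(vlines[bi - 1] + 1, vlines[bi] + 1):
--                     if f[r][c] == '@':
--                         cnt += 1
--             if cnt != each:
--                 return False
--     return True
-- ===== Notes on version B (the rewrite author's own statement) =====
-- stated objective: alternative
-- what changed: B drops A's (n+1)x(m+1) 2D prefix-sum table: it builds two 1D prefix arrays (per-row and per-column '@' counts), finds the cut lines by a greedy prefix-difference scan over them, and verifies each block by directly counting '@' cells in its row/column range instead of A's four-corner 2D-table arithmetic.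
import Mathlib
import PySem

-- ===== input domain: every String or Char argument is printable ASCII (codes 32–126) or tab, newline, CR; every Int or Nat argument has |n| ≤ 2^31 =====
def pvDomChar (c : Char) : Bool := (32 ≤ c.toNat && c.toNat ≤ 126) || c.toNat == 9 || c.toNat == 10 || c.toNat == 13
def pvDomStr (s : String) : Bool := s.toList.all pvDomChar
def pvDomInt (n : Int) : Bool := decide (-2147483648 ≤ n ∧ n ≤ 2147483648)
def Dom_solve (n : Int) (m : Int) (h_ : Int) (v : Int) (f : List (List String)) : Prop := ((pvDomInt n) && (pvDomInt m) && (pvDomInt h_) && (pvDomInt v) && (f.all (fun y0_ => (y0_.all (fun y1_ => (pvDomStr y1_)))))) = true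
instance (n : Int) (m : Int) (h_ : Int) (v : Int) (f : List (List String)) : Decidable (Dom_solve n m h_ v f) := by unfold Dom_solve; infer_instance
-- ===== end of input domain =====

-- B replaces A's 2D prefix-sum table by two 1D prefix arrays (over rows and over columns), a
-- prefix-difference greedy scan for the cut lines, and a direct per-block cell count instead of
-- A's four-corner table arithmetic (objective: alternative); same value wherever A returns.

-- shared cell accessor: f[i][j] == '@' as 0/1 (both Pythons read cells exactly this way)
def pvCell (f : List (List String)) (i j : Int) : Int :=
  if ((PySem.List.pyGet? f i).bind (fun r => PySem.List.pyGet? r j)) = some "@" then 1 else 0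

-- ===== PORT A =====
-- the DP table sums[i][j] of A, filled cell by cell by the same recurrence
def aSums (f : List (List String)) : Nat → Nat → Int
  | 0, _ => 0
  | _+1, 0 => 0
  | i+1, j+1 => aSums f (i+1) j + aSums f i (j+1) - aSums f i j + pvCell f i j
termination_by i j => (i, j)

-- A's greedy line loop (used once for vlines with P = sums[n][·], once for hlines with P = sums[·][m])
def aLines (P : Nat → Int) (target : Int) : List Int → Int → List Int → List Int
  | [], _, vl => vl
  | i :: rest, li, vl =>
    if P (i + 1).toNat - P (li + 1).toNat = target then aLines P target rest i (vl ++ [i])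
    else aLines P target rest li vl

def solve (n : Int) (m : Int) (h_ : Int) (v : Int) (f : List (List String)) : Bool :=
  let N := n.toNat
  let M := m.toNat
  let d := (h_ + 1) * (v + 1)
  let total := aSums f N M
  if PySem.Int.mod total d ≠ 0 then false
  else
    let each := PySem.Int.floordiv total d
    if each = 0 then true
    else
      let vl := aLines (fun k => aSums f N k) (each * (h_ + 1)) (PySem.List.pyRange 0 m) (-1) [-1]
      let hl := aLines (fun k => aSums f k M) (each * (v + 1)) (PySem.List.pyRange 0 n) (-1) [-1]
      if (vl.length : Int) < v + 2 ∨ (hl.length : Int) < h_ + 2 then false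
      else
        (PySem.List.pyRange 1 (v + 2)).all (fun bi =>
          (PySem.List.pyRange 1 (h_ + 2)).all (fun bj =>
            decide (aSums f (PySem.List.pyGetD hl bj 0 + 1).toNat (PySem.List.pyGetD vl bi 0 + 1).toNat
              - aSums f (PySem.List.pyGetD hl (bj - 1) 0 + 1).toNat (PySem.List.pyGetD vl bi 0 + 1).toNat
              - aSums f (PySem.List.pyGetD hl bj 0 + 1).toNat (PySem.List.pyGetD vl (bi - 1) 0 + 1).toNat
              + aSums f (PySem.List.pyGetD hl (bj - 1) 0 + 1).toNat (PySem.List.pyGetD vl (bi - 1) 0 + 1).toNat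
              = each)))

-- ===== PORT B =====
-- count of '@' in row i over columns [0, m)
def bRowcnt (f : List (List String)) (i m : Int) : Int :=
  (PySem.List.pyRange 0 m).foldl (fun cnt j => cnt + pvCell f i j) 0

-- count of '@' in column j over rows [0, n)
def bColcnt (f : List (List String)) (j n : Int) : Int :=
  (PySem.List.pyRange 0 n).foldl (fun cnt i => cnt + pvCell f i j) 0

-- rowpre[i] = '@' in rows [0, i): preallocated [0]*(n+1), filled left to right
def bRowpre (f : List (List String)) (n m : Int) : List Int :=
  (PySem.List.pyRange 0 n).foldl
    (fun pre i => PySem.List.pySetD pre (i + 1) (PySem.List.pyGetD pre i 0 + bRowcnt f i m))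
    (List.replicate (n + 1).toNat 0)

-- colpre[j] = '@' in columns [0, j)
def bColpre (f : List (List String)) (n m : Int) : List Int :=
  (PySem.List.pyRange 0 m).foldl
    (fun pre j => PySem.List.pySetD pre (j + 1) (PySem.List.pyGetD pre j 0 + bColcnt f j n))
    (List.replicate (m + 1).toNat 0)

-- B's greedy scan over a 1D prefix array: slice [last, j] hits the target ⇒ cut after j
def bLines (pre : List Int) (target : Int) : List Int → Int → List Int → List Int
  | [], _, vl => vl
  | j :: rest, last, vl =>
    if PySem.List.pyGetD pre (j + 1) 0 - PySem.List.pyGetD pre last 0 = target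
    then bLines pre target rest (j + 1) (vl ++ [j])
    else bLines pre target rest last vl

-- B's direct per-block cell count over rows [r0, r1), cols [c0, c1)
def bBlock (f : List (List String)) (r0 r1 c0 c1 : Int) : Int :=
  (PySem.List.pyRange r0 r1).foldl
    (fun acc r => (PySem.List.pyRange c0 c1).foldl (fun a c => a + pvCell f r c) acc) 0

def solve_alt (n : Int) (m : Int) (h_ : Int) (v : Int) (f : List (List String)) : Bool :=
  let rowpre := bRowpre f n m
  let colpre := bColpre f n m
  let rowtotal := PySem.List.pyGetD rowpre n 0
  let coltotal := PySem.List.pyGetD colpre m 0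
  let parts := (h_ + 1) * (v + 1)
  if PySem.Int.mod rowtotal parts ≠ 0 then false
  else
    let each := PySem.Int.floordiv rowtotal parts
    if each = 0 then true
    else
      let vtarget := PySem.Int.floordiv coltotal (v + 1)
      let htarget := PySem.Int.floordiv rowtotal (h_ + 1)
      let vl := bLines colpre vtarget (PySem.List.pyRange 0 m) 0 [-1]
      let hl := bLines rowpre htarget (PySem.List.pyRange 0 n) 0 [-1]
      if (vl.length : Int) < v + 2 ∨ (hl.length : Int) < h_ + 2 then false
      else
        (PySem.List.pyRange 1 (v + 2)).all (fun bi =>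
          (PySem.List.pyRange 1 (h_ + 2)).all (fun bj =>
            decide (bBlock f (PySem.List.pyGetD hl (bj - 1) 0 + 1) (PySem.List.pyGetD hl bj 0 + 1)
              (PySem.List.pyGetD vl (bi - 1) 0 + 1) (PySem.List.pyGetD vl bi 0 + 1) = each)))

-- ===== PRECONDITION & SPEC =====
-- Pre_ excludes exactly the inputs where A raises: negative grid dimensions (IndexError on the
-- empty prefix table), (h+1)*(v+1) = 0 (ZeroDivisionError), and — when m > 0, the only case in
-- which A reads the grid — a grid with fewer than n rows or a row shorter than m (IndexError).
def Pre_solve (n : Int) (m : Int) (h_ : Int) (v : Int) (f : List (List String)) : Prop :=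
  0 ≤ n ∧ 0 ≤ m ∧ (h_ + 1) * (v + 1) ≠ 0 ∧
    (m = 0 ∨ (n ≤ (f.length : Int) ∧ ∀ r ∈ f.take n.toNat, m ≤ (r.length : Int)))
instance (n : Int) (m : Int) (h_ : Int) (v : Int) (f : List (List String)) : Decidable (Pre_solve n m h_ v f) := by unfold Pre_solve; infer_instance

def pvWitness_solve : Int × Int × Int × Int × List (List String) :=
  (2, 2, 0, 1, [[".", "@"], [".", "@"]])

def Spec_solve (n : Int) (m : Int) (h_ : Int) (v : Int) (f : List (List String)) (out : Bool) : Prop := out = solve_alt n m h_ v f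
instance (n : Int) (m : Int) (h_ : Int) (v : Int) (f : List (List String)) (out : Bool) : Decidable (Spec_solve n m h_ v f out) := by unfold Spec_solve; infer_instance

-- ===== CLAIM (what is proved, stated in full; the proofs are below) =====
def Claim_equal_solve : Prop := ∀ (n : Int) (m : Int) (h_ : Int) (v : Int) (f : List (List String)), Dom_solve n m h_ v f → Pre_solve n m h_ v f → Spec_solve n m h_ v f (solve n m h_ v f)

-- ===== LEMMAS AND PROOFS =====

-- A's prefix table is the rectangle sum of cells
theorem aSums_eq (f : List (List String)) (i j : Nat) :
    aSums f i j = ∑ r ∈ Finset.range i, ∑ c ∈ Finset.range j, pvCell f (r : Int) (c : Int) := by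
  induction i generalizing j with
  | zero => simp [aSums]
  | succ i ih =>
    induction j with
    | zero => simp [aSums]
    | succ j ihj =>
      rw [aSums, ihj, ih, ih]
      simp [Finset.sum_range_succ]
      ring

theorem sum_map_range_int (g : Nat → Int) (n : Nat) :
    ((List.range n).map g).sum = ∑ i ∈ Finset.range n, g i := by
  induction n with
  | zero => simp
  | succ n ih => simp [List.range_succ, Finset.sum_range_succ, ih]

-- a Python sum over range(p, q) as a Finset.Ico sum
theorem strip_sum (g : Int → Int) (p q : Int) (h0 : 0 ≤ p) :
    ((PySem.List.pyRange p q).map g).sum = ∑ k ∈ Finset.Ico p.toNat q.toNat, g (k : Int) := by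
  rw [PySem.List.pyRange_one, List.map_map, sum_map_range_int, Finset.sum_Ico_eq_sum_range]
  have hc : q.toNat - p.toNat = (q - p).toNat := by omega
  rw [hc]
  refine Finset.sum_congr rfl (fun k _ => ?_)
  simp only [Function.comp_apply]
  congr 1
  omega

-- B's direct block count equals A's four-corner difference of the prefix table
theorem rect_strip (f : List (List String)) (x y c d : Int)
    (hx : -1 ≤ x) (hxy : x < y) (hc : -1 ≤ c) (hcd : c < d) :
    ((PySem.List.pyRange (x+1) (y+1)).map
      (fun r => ((PySem.List.pyRange (c+1) (d+1)).map (fun cc => pvCell f r cc)).sum)).sum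
    = aSums f (y+1).toNat (d+1).toNat - aSums f (x+1).toNat (d+1).toNat
      - aSums f (y+1).toNat (c+1).toNat + aSums f (x+1).toNat (c+1).toNat := by
  have hx' : (x+1).toNat ≤ (y+1).toNat := by omega
  have hc' : (c+1).toNat ≤ (d+1).toNat := by omega
  rw [strip_sum _ _ _ (by omega)]
  have hinner : ∀ r : Nat, ((PySem.List.pyRange (c+1) (d+1)).map (fun cc => pvCell f (r:Int) cc)).sum
      = ∑ k ∈ Finset.Ico (c+1).toNat (d+1).toNat, pvCell f (r:Int) (k:Int) := by
    intro r; rw [strip_sum _ _ _ (by omega)]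
  calc ∑ k ∈ Finset.Ico (x+1).toNat (y+1).toNat,
        ((PySem.List.pyRange (c+1) (d+1)).map (fun cc => pvCell f (k:Int) cc)).sum
      = ∑ k ∈ Finset.Ico (x+1).toNat (y+1).toNat,
        (∑ t ∈ Finset.range (d+1).toNat, pvCell f (k:Int) (t:Int)
         - ∑ t ∈ Finset.range (c+1).toNat, pvCell f (k:Int) (t:Int)) := by
        refine Finset.sum_congr rfl (fun k _ => ?_)
        rw [hinner k, Finset.sum_Ico_eq_sub _ hc']
    _ = _ := by
        rw [Finset.sum_sub_distrib, Finset.sum_Ico_eq_sub _ hx', Finset.sum_Ico_eq_sub _ hx']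
        simp only [aSums_eq]
        ring

theorem bBlock_eq (f : List (List String)) (x y c d : Int)
    (hx : -1 ≤ x) (hxy : x < y) (hc : -1 ≤ c) (hcd : c < d) :
    bBlock f (x+1) (y+1) (c+1) (d+1)
    = aSums f (y+1).toNat (d+1).toNat - aSums f (x+1).toNat (d+1).toNat
      - aSums f (y+1).toNat (c+1).toNat + aSums f (x+1).toNat (c+1).toNat := by
  rw [← rect_strip f x y c d hx hxy hc hcd]
  unfold bBlock
  simp only [PySem.List.foldl_add]
  simp

-- values of a preallocated prefix array after its fill loop
theorem build_pre (g : Int → Int) (n : Int) :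
    ∀ (K : Nat) (a : Int) (pre : List Int), (n - a).toNat ≤ K → 0 ≤ a → a ≤ n →
    pre.length = (n + 1).toNat →
    (∀ k : Int, 0 ≤ k → k ≤ n →
      PySem.List.pyGetD pre k 0 = if k ≤ a then ∑ t ∈ Finset.range k.toNat, g (t : Int) else 0) →
    ∀ k : Int, 0 ≤ k → k ≤ n →
      PySem.List.pyGetD
        ((PySem.List.pyRange a n).foldl
          (fun pre i => PySem.List.pySetD pre (i + 1) (PySem.List.pyGetD pre i 0 + g i)) pre) k 0
      = ∑ t ∈ Finset.range k.toNat, g (t : Int) := by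
  intro K
  induction K with
  | zero =>
    intro a pre hK ha0 han hlen hinv k hk0 hkn
    rw [PySem.List.pyRange_one_eq_nil (by omega)]
    simpa [show k ≤ a by omega] using hinv k hk0 hkn
  | succ K ih =>
    intro a pre hK ha0 han hlen hinv k hk0 hkn
    by_cases hab : n ≤ a
    · rw [PySem.List.pyRange_one_eq_nil hab]
      simpa [show k ≤ a by omega] using hinv k hk0 hkn
    · have hab' : a < n := by omega
      rw [PySem.List.pyRange_one_cons hab']
      simp only [List.foldl_cons]
      refine ih (a + 1) _ (by omega) (by omega) (by omega)
        (by rw [PySem.List.length_pySetD]; exact hlen) ?_ k hk0 hkn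
      intro k' hk0' hkn'
      have hpa : PySem.List.pyGetD pre a 0 = ∑ t ∈ Finset.range a.toNat, g (t : Int) := by
        simpa [show a ≤ a by omega] using hinv a (by omega) (by omega)
      have hw : PySem.List.pySetD pre (a + 1) (PySem.List.pyGetD pre a 0 + g a)
          = pre.set (a + 1).toNat (PySem.List.pyGetD pre a 0 + g a) :=
        PySem.List.pySetD_of_nonneg pre _ (by omega)
      have hkb : k'.toNat < (pre.set (a + 1).toNat (PySem.List.pyGetD pre a 0 + g a)).length := by
        rw [List.length_set]; omega
      have h1 : PySem.List.pyGetD (pre.set (a + 1).toNat (PySem.List.pyGetD pre a 0 + g a)) k' 0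
          = (pre.set (a + 1).toNat (PySem.List.pyGetD pre a 0 + g a))[k'.toNat]'hkb :=
        PySem.List.pyGetD_eq_getElem _ 0 hk0' (by rw [List.length_set]; omega)
      rw [hw, h1, List.getElem_set]
      by_cases hke : (a + 1).toNat = k'.toNat
      · rw [if_pos hke, if_pos (by omega : k' ≤ a + 1)]
        have hk2 : k'.toNat = a.toNat + 1 := by omega
        rw [hk2, Finset.sum_range_succ, hpa]
        have hca : ((a.toNat : Nat) : Int) = a := by omega
        rw [hca]
      · rw [if_neg hke]
        have h2 : pre[k'.toNat]'(by omega) = PySem.List.pyGetD pre k' 0 :=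
          (PySem.List.pyGetD_eq_getElem pre 0 hk0' (by omega)).symm
        rw [h2, hinv k' hk0' hkn']
        by_cases hka : k' ≤ a
        · rw [if_pos hka, if_pos (by omega)]
        · rw [if_neg hka, if_neg (by omega)]

theorem pre_get (g : Int → Int) (n : Int) (hn : 0 ≤ n) (k : Int) (hk0 : 0 ≤ k) (hkn : k ≤ n) :
    PySem.List.pyGetD
      ((PySem.List.pyRange 0 n).foldl
        (fun pre i => PySem.List.pySetD pre (i + 1) (PySem.List.pyGetD pre i 0 + g i))
        (List.replicate (n + 1).toNat 0)) k 0
    = ∑ t ∈ Finset.range k.toNat, g (t : Int) := by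
  refine build_pre g n n.toNat 0 _ (by omega) le_rfl hn (by simp) ?_ k hk0 hkn
  intro k' h0 hk
  have hrep : PySem.List.pyGetD (List.replicate (n + 1).toNat (0:Int)) k' 0 = 0 := by
    rw [PySem.List.pyGetD_eq_getElem _ 0 h0 (by simp; omega)]
    simp
  rw [hrep]
  split_ifs with hle
  · have : k' = 0 := by omega
    simp [this]
  · rfl

-- the two counts, as rectangle-row/-column sums
theorem bRowcnt_eq (f : List (List String)) (i m : Int) :
    bRowcnt f i m = ∑ c ∈ Finset.range m.toNat, pvCell f i (c : Int) := by
  unfold bRowcnt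
  rw [PySem.List.foldl_add, strip_sum _ _ _ le_rfl]
  rw [Finset.range_eq_Ico]
  norm_num

theorem bColcnt_eq (f : List (List String)) (j n : Int) :
    bColcnt f j n = ∑ r ∈ Finset.range n.toNat, pvCell f (r : Int) j := by
  unfold bColcnt
  rw [PySem.List.foldl_add, strip_sum _ _ _ le_rfl]
  rw [Finset.range_eq_Ico]
  norm_num

-- reads of the two prefix arrays are values of A's table's last row / column
theorem bRowpre_get (f : List (List String)) (n m k : Int) (hn : 0 ≤ n) (hk0 : 0 ≤ k) (hkn : k ≤ n) :
    PySem.List.pyGetD (bRowpre f n m) k 0 = aSums f k.toNat m.toNat := by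
  unfold bRowpre
  rw [pre_get _ _ hn _ hk0 hkn, aSums_eq]
  refine Finset.sum_congr rfl (fun t _ => ?_)
  rw [bRowcnt_eq]

theorem bColpre_get (f : List (List String)) (n m k : Int) (hm : 0 ≤ m) (hk0 : 0 ≤ k) (hkm : k ≤ m) :
    PySem.List.pyGetD (bColpre f n m) k 0 = aSums f n.toNat k.toNat := by
  unfold bColpre
  rw [pre_get _ _ hm _ hk0 hkm, aSums_eq, Finset.sum_comm]
  refine Finset.sum_congr rfl (fun t _ => ?_)
  rw [bColcnt_eq]

-- exact division cancels
theorem floordiv_mul_cancel (q b : Int) (hb : b ≠ 0) : PySem.Int.floordiv (q * b) b = q := by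
  have h := PySem.Int.floordiv_mul_add_mod (q * b) b
  have hm : PySem.Int.mod (q * b) b = 0 :=
    (PySem.Int.mod_eq_zero_iff_dvd _ _).mpr (dvd_mul_left b q)
  rw [hm, add_zero] at h
  exact mul_right_cancel₀ hb h

-- A's greedy scan over the table and B's scan over a 1D prefix array agree
theorem lines_eq (P : Nat → Int) (target : Int) (b : Int) (pre : List Int)
    (hpre : ∀ k : Int, 0 ≤ k → k ≤ b → PySem.List.pyGetD pre k 0 = P k.toNat) :
    ∀ (K : Nat) (a li : Int) (vl : List Int), (b - a).toNat ≤ K → 0 ≤ a → -1 ≤ li → li + 1 ≤ a →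
    aLines P target (PySem.List.pyRange a b) li vl
      = bLines pre target (PySem.List.pyRange a b) (li + 1) vl := by
  intro K
  induction K with
  | zero =>
    intro a li vl hK _ _ _
    rw [PySem.List.pyRange_one_eq_nil (by omega)]
    rfl
  | succ K ih =>
    intro a li vl hK ha hli hlia
    by_cases hab : b ≤ a
    · rw [PySem.List.pyRange_one_eq_nil hab]; rfl
    · have hab' : a < b := by omega
      rw [PySem.List.pyRange_one_cons hab']
      have hc1 : PySem.List.pyGetD pre (a + 1) 0 = P (a + 1).toNat :=
        hpre (a + 1) (by omega) (by omega)
      have hc2 : PySem.List.pyGetD pre (li + 1) 0 = P (li + 1).toNat :=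
        hpre (li + 1) (by omega) (by omega)
      show (if P (a + 1).toNat - P (li + 1).toNat = target then _ else _) = _
      by_cases hcond : P (a + 1).toNat - P (li + 1).toNat = target
      · simp only [bLines, hc1, hc2, hcond]
        have := ih (a + 1) a (vl ++ [a]) (by omega) (by omega) (by omega) (by omega)
        simpa using this
      · simp only [bLines, hc1, hc2, if_neg hcond]
        exact ih (a + 1) li vl (by omega) (by omega) hli (by omega)

-- the recorded lines are the initial list followed by a subsequence of the scanned indices
theorem aLines_sublist (P : Nat → Int) (target : Int) :
    ∀ (L : List Int) (li : Int) (vl : List Int), ∃ s, aLines P target L li vl = vl ++ s ∧ s.Sublist L := by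
  intro L
  induction L with
  | nil => intro li vl; exact ⟨[], by simp [aLines], List.Sublist.refl _⟩
  | cons i rest ih =>
    intro li vl
    by_cases hcond : P (i + 1).toNat - P (li + 1).toNat = target
    · obtain ⟨s, hs, hsub⟩ := ih i (vl ++ [i])
      exact ⟨i :: s, by simpa [aLines, hcond, List.append_assoc] using hs, List.Sublist.cons₂ _ hsub⟩
    · obtain ⟨s, hs, hsub⟩ := ih li vl
      exact ⟨s, by simpa [aLines, hcond] using hs, List.Sublist.cons _ hsub⟩

theorem all_congr_mem {α : Type} {l : List α} {p q : α → Bool} (h : ∀ x ∈ l, p x = q x) :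
    l.all p = l.all q := by
  induction l with
  | nil => rfl
  | cons x xs ih => simp_all

-- structural facts about the recorded line lists: strictly increasing, elements ≥ -1
theorem aLines_shape (P : Nat → Int) (t b : Int) :
    (aLines P t (PySem.List.pyRange 0 b) (-1) [-1]).Pairwise (· < ·) ∧
      ∀ x ∈ aLines P t (PySem.List.pyRange 0 b) (-1) [-1], -1 ≤ x := by
  obtain ⟨s, hs, hsub⟩ := aLines_sublist P t (PySem.List.pyRange 0 b) (-1) [-1]
  have hbig : (([-1] ++ PySem.List.pyRange 0 b) : List Int).Pairwise (· < ·) := by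
    rw [List.pairwise_append]
    refine ⟨by simp, PySem.List.pairwise_lt_pyRange_one 0 b, ?_⟩
    intro x hx y hy
    simp at hx
    have := (PySem.List.mem_pyRange_one.mp hy).1
    omega
  have hsub' : ((([-1] : List Int) ++ s)).Sublist ([-1] ++ PySem.List.pyRange 0 b) :=
    List.Sublist.append (List.Sublist.refl _) hsub
  constructor
  · rw [hs]; exact List.Pairwise.sublist hsub' hbig
  · intro x hx
    rw [hs] at hx
    rcases List.mem_append.mp hx with hx | hx
    · simp at hx; omega
    · have := (PySem.List.mem_pyRange_one.mp (hsub.subset hx)).1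
      omega

-- ===== VERDICT (by name: the statement is the Claim_ definition above) =====
theorem solve_spec : Claim_equal_solve := by
  intro n m h_ v f _ hpre
  obtain ⟨hn, hm, hd, -⟩ := hpre
  unfold Spec_solve
  have hh1 : h_ + 1 ≠ 0 := fun h => hd (by rw [h, zero_mul])
  have hv1 : v + 1 ≠ 0 := fun h => hd (by rw [h, mul_zero])
  have hrow : PySem.List.pyGetD (bRowpre f n m) n 0 = aSums f n.toNat m.toNat :=
    bRowpre_get f n m n hn (by omega) le_rfl
  have hcol : PySem.List.pyGetD (bColpre f n m) m 0 = aSums f n.toNat m.toNat :=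
    bColpre_get f n m m hm (by omega) le_rfl
  simp only [solve, solve_alt, hrow, hcol]
  by_cases h1 : PySem.Int.mod (aSums f n.toNat m.toNat) ((h_ + 1) * (v + 1)) = 0
  · simp only [h1, ne_eq, not_true_eq_false, if_false]
    by_cases h2 : PySem.Int.floordiv (aSums f n.toNat m.toNat) ((h_ + 1) * (v + 1)) = 0
    · simp [h2]
    · simp only [h2, if_false]
      have hT : aSums f n.toNat m.toNat
          = PySem.Int.floordiv (aSums f n.toNat m.toNat) ((h_ + 1) * (v + 1)) * ((h_ + 1) * (v + 1)) := by
        have h := PySem.Int.floordiv_mul_add_mod (aSums f n.toNat m.toNat) ((h_ + 1) * (v + 1))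
        rw [h1, add_zero] at h
        omega
      have hnum1 : (PySem.Int.floordiv (aSums f n.toNat m.toNat) ((h_ + 1) * (v + 1)) * (h_ + 1)) * (v + 1)
          = aSums f n.toNat m.toNat := by linear_combination -hT
      have hnum2 : (PySem.Int.floordiv (aSums f n.toNat m.toNat) ((h_ + 1) * (v + 1)) * (v + 1)) * (h_ + 1)
          = aSums f n.toNat m.toNat := by linear_combination -hT
      have hvt : PySem.Int.floordiv (aSums f n.toNat m.toNat) (v + 1)
          = PySem.Int.floordiv (aSums f n.toNat m.toNat) ((h_ + 1) * (v + 1)) * (h_ + 1) := by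
        conv_lhs => rw [← hnum1]
        exact floordiv_mul_cancel _ _ hv1
      have hht : PySem.Int.floordiv (aSums f n.toNat m.toNat) (h_ + 1)
          = PySem.Int.floordiv (aSums f n.toNat m.toNat) ((h_ + 1) * (v + 1)) * (v + 1) := by
        conv_lhs => rw [← hnum2]
        exact floordiv_mul_cancel _ _ hh1
      rw [hvt, hht]
      have hvleq : aLines (fun k => aSums f n.toNat k)
            (PySem.Int.floordiv (aSums f n.toNat m.toNat) ((h_ + 1) * (v + 1)) * (h_ + 1))
            (PySem.List.pyRange 0 m) (-1) [-1]
          = bLines (bColpre f n m)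
            (PySem.Int.floordiv (aSums f n.toNat m.toNat) ((h_ + 1) * (v + 1)) * (h_ + 1))
            (PySem.List.pyRange 0 m) 0 [-1] := by
        have := lines_eq (fun k => aSums f n.toNat k)
          (PySem.Int.floordiv (aSums f n.toNat m.toNat) ((h_ + 1) * (v + 1)) * (h_ + 1)) m (bColpre f n m)
          (fun k hk0 hkm => bColpre_get f n m k hm hk0 hkm)
          (m - 0).toNat 0 (-1) [-1] (by omega) (by omega) (by omega) (by omega)
        simpa using this
      have hhleq : aLines (fun k => aSums f k m.toNat)
            (PySem.Int.floordiv (aSums f n.toNat m.toNat) ((h_ + 1) * (v + 1)) * (v + 1))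
            (PySem.List.pyRange 0 n) (-1) [-1]
          = bLines (bRowpre f n m)
            (PySem.Int.floordiv (aSums f n.toNat m.toNat) ((h_ + 1) * (v + 1)) * (v + 1))
            (PySem.List.pyRange 0 n) 0 [-1] := by
        have := lines_eq (fun k => aSums f k m.toNat)
          (PySem.Int.floordiv (aSums f n.toNat m.toNat) ((h_ + 1) * (v + 1)) * (v + 1)) n (bRowpre f n m)
          (fun k hk0 hkn => bRowpre_get f n m k hn hk0 hkn)
          (n - 0).toNat 0 (-1) [-1] (by omega) (by omega) (by omega) (by omega)
        simpa using this
      rw [← hvleq, ← hhleq]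
      set each := PySem.Int.floordiv (aSums f n.toNat m.toNat) ((h_ + 1) * (v + 1)) with heach
      set vl := aLines (fun k => aSums f n.toNat k) (each * (h_ + 1)) (PySem.List.pyRange 0 m) (-1) [-1] with hvl
      set hl := aLines (fun k => aSums f k m.toNat) (each * (v + 1)) (PySem.List.pyRange 0 n) (-1) [-1] with hhl
      by_cases h3 : (vl.length : Int) < v + 2 ∨ (hl.length : Int) < h_ + 2
      · simp only [h3, if_true]
      · simp only [h3, if_false]
        have hv2 : v + 2 ≤ (vl.length : Int) := by omega
        have hh2 : h_ + 2 ≤ (hl.length : Int) := by omega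
        obtain ⟨hpwv, hlbv⟩ := aLines_shape (fun k => aSums f n.toNat k) (each * (h_ + 1)) m
        obtain ⟨hpwh, hlbh⟩ := aLines_shape (fun k => aSums f k m.toNat) (each * (v + 1)) n
        rw [← hvl] at hpwv hlbv
        rw [← hhl] at hpwh hlbh
        refine all_congr_mem (fun bi hbi => ?_)
        refine all_congr_mem (fun bj hbj => ?_)
        obtain ⟨hbi1, hbi2⟩ := PySem.List.mem_pyRange_one.mp hbi
        obtain ⟨hbj1, hbj2⟩ := PySem.List.mem_pyRange_one.mp hbj
        have hbiL : bi < (vl.length : Int) := by omega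
        have hbjL : bj < (hl.length : Int) := by omega
        have e1 : PySem.List.pyGetD vl bi 0 = vl[bi.toNat]'(by omega) :=
          PySem.List.pyGetD_eq_getElem vl 0 (by omega) hbiL
        have e2 : PySem.List.pyGetD vl (bi - 1) 0 = vl[(bi - 1).toNat]'(by omega) :=
          PySem.List.pyGetD_eq_getElem vl 0 (by omega) (by omega)
        have e3 : PySem.List.pyGetD hl bj 0 = hl[bj.toNat]'(by omega) :=
          PySem.List.pyGetD_eq_getElem hl 0 (by omega) hbjL
        have e4 : PySem.List.pyGetD hl (bj - 1) 0 = hl[(bj - 1).toNat]'(by omega) :=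
          PySem.List.pyGetD_eq_getElem hl 0 (by omega) (by omega)
        rw [e1, e2, e3, e4]
        have hcd : vl[(bi - 1).toNat]'(by omega) < vl[bi.toNat]'(by omega) :=
          List.pairwise_iff_getElem.mp hpwv _ _ (by omega) (by omega) (by omega)
        have hxy : hl[(bj - 1).toNat]'(by omega) < hl[bj.toNat]'(by omega) :=
          List.pairwise_iff_getElem.mp hpwh _ _ (by omega) (by omega) (by omega)
        have hcl : -1 ≤ vl[(bi - 1).toNat]'(by omega) := hlbv _ (List.getElem_mem _)
        have hxl : -1 ≤ hl[(bj - 1).toNat]'(by omega) := hlbh _ (List.getElem_mem _)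
        rw [bBlock_eq f _ _ _ _ hxl hxy hcl hcd]
  · rw [if_pos h1, if_pos h1]
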